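-- pv_equiv track=rewrite | github.com/Gabriel-Caldas/google_challenge_foobar | sol4_v3.py | solution
-- ===== SOURCE A (Python) =====
-- def solution(l):
-- 	"""takes a list of positive integers l and counts the number of
-- 	"lucky triples" of (li, lj, lk) where the list indices meet the requirement i < j < k."""
--
-- 	size = len(l)
-- 	if size < 3:
-- 		return 0
--
-- 	triples = 0
--
-- 	for i in range(1,size-1): ## i runs gets the index of each possible y position
-- 		xs_for_y = len([x for x in l[:i] if l[i] % x == 0]) # all possibles x's (to the left) for the y (l[i])
-- 		zs_for_y = len([z for z in l[i+1:] if z % l[i] == 0]) # all possibles z's (to the right) for the y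
--
-- 		triples_for_y = xs_for_y * zs_for_y
-- 		triples += triples_for_y
--
-- 	return triples
-- ===== SOURCE B (Python) =====
-- def solution(l):
--     """takes a list of positive integers l and counts the number of
--     "lucky triples" (l[i], l[j], l[k]) with i < j < k, l[i] | l[j] and l[j] | l[k]."""
--     n = len(l)
--     if n < 3:
--         return 0
--     # pairs[j] = number of indices i < j with l[i] dividing l[j]
--     pairs = []
--     for j in range(n):
--         c = 0
--         for i in range(j):
--             if l[j] % l[i] == 0:
--                 c += 1
--         pairs.append(c)
--     # each triple counted once via its (middle, top) extension
--     total = 0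
--     for k in range(n):
--         for j in range(k):
--             if l[k] % l[j] == 0:
--                 total += pairs[j]
--     return total
-- ===== Notes on version B (the rewrite author's own statement) =====
-- stated objective: alternative
-- what changed: Instead of A's per-middle product of a left divisor scan and a right multiple scan, B builds a pairs[j] table (count of left divisors of l[j]) in one pass and then sums pairs[j] over all divisible (j,k) extensions in a second pass, counting each triple via its (middle,top) pair.
-- outside the precondition, e.g. on solution([0, 1, 2]): A raises ZeroDivisionError, B raises ZeroDivisionError
import Mathlib
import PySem

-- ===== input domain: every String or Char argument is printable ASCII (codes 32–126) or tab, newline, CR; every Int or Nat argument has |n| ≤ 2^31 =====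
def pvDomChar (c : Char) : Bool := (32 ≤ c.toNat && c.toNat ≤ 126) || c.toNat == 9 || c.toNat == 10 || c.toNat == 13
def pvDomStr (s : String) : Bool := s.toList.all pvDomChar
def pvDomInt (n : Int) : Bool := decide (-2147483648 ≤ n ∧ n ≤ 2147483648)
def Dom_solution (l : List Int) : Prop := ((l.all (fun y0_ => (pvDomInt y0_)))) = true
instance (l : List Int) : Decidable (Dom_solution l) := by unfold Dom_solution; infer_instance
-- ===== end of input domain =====

-- B counts each lucky triple via its (middle, top) extension of a precomputed pairs[j]
-- table (left divisors of l[j]) instead of A's per-middle left×right product (objective: alternative).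

-- ===== PORT A =====
def solution (l : List Int) : Int :=
  let size : Int := l.length
  if size < 3 then 0
  else
    -- for i in range(1, size-1); l[i] is always in range, so pyGetD is exact here
    (PySem.List.pyRange 1 (size - 1) 1).foldl (fun triples i =>
      let li := PySem.List.pyGetD l i 0
      let xs_for_y : Int :=
        ((PySem.List.slice l none (some i)).filter (fun x => PySem.Int.mod li x == 0)).length
      let zs_for_y : Int :=
        ((PySem.List.slice l (some (i + 1)) none).filter (fun z => PySem.Int.mod z li == 0)).length
      triples + xs_for_y * zs_for_y) 0

-- ===== PORT B =====
def solution_alt (l : List Int) : Int :=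
  let n : Int := l.length
  if n < 3 then 0
  else
    -- first pass: pairs[j] = number of i < j with l[i] dividing l[j]
    let pairs := (PySem.List.pyRange 0 n 1).foldl (fun pairs j =>
      let c := (PySem.List.pyRange 0 j 1).foldl (fun c i =>
        if PySem.Int.mod (PySem.List.pyGetD l j 0) (PySem.List.pyGetD l i 0) == 0
        then c + 1 else c) (0 : Int)
      pairs ++ [c]) ([] : List Int)
    -- second pass: extend each (i, j) pair by every top k with l[j] dividing l[k]
    (PySem.List.pyRange 0 n 1).foldl (fun total k =>
      (PySem.List.pyRange 0 k 1).foldl (fun total j =>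
        if PySem.Int.mod (PySem.List.pyGetD l k 0) (PySem.List.pyGetD l j 0) == 0
        then total + PySem.List.pyGetD pairs j 0 else total) total) 0

-- ===== PRECONDITION & SPEC =====
-- Pre_ excludes exactly the inputs on which the Python A raises ZeroDivisionError
-- (a zero anywhere but the last position, with at least 3 elements); B raises there too.
def Pre_solution (l : List Int) : Prop := l.length < 3 ∨ (0 : Int) ∉ l.dropLast
instance (l : List Int) : Decidable (Pre_solution l) := by unfold Pre_solution; infer_instance
def pvWitness_solution : List Int := [1, 2, 4, 8]

def Spec_solution (l : List Int) (out : Int) : Prop := out = solution_alt l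
instance (l : List Int) (out : Int) : Decidable (Spec_solution l out) := by unfold Spec_solution; infer_instance

-- ===== CLAIM (what is proved, stated in full; the proofs are below) =====
def Claim_equal_solution : Prop := ∀ (l : List Int), Dom_solution l → Pre_solution l → Spec_solution l (solution l)

-- ===== LEMMAS AND PROOFS =====

-- indicator: l[j] divides l[k] (indices as Nat, reading the list with getD)
def pvInd (l : List Int) (j k : Nat) : Int :=
  if PySem.Int.mod (l.getD k 0) (l.getD j 0) == 0 then 1 else 0

-- number of left divisors of l[j] (= B's pairs[j], = A's xs_for_y at middle j)
def pvL (l : List Int) (j : Nat) : Int := ∑ i ∈ Finset.range j, pvInd l i j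

lemma pv_sum_map_range (m : Nat) (f : Nat → Int) :
    ((List.range m).map f).sum = ∑ i ∈ Finset.range m, f i := by
  induction m with
  | zero => simp
  | succ m ih =>
    rw [List.range_succ, List.map_append, List.sum_append, Finset.sum_range_succ, ih]; simp

lemma pv_count_range (m : Nat) (q : Nat → Bool) :
    ((List.range m).countP q : Int) = ∑ i ∈ Finset.range m, (if q i then (1 : Int) else 0) := by
  rw [← PySem.List.sum_map_ite_one_zero q (List.range m), pv_sum_map_range]

lemma pv_countP_take (l : List Int) (p : Int → Bool) :
    ∀ j, j ≤ l.length →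
      ((l.take j).countP p : Int) = ∑ i ∈ Finset.range j, (if p (l.getD i 0) then (1 : Int) else 0) := by
  intro j
  induction j with
  | zero => simp
  | succ j ih =>
    intro hj
    have hjl : j < l.length := by omega
    rw [List.take_add_one, List.countP_append, Finset.sum_range_succ, ← ih (by omega)]
    have hget : l[j]? = some l[j] := List.getElem?_eq_getElem hjl
    simp [hget, List.getD_eq_getElem?_getD, List.countP_cons]

lemma pv_countP_drop (l : List Int) (p : Int → Bool) (j : Nat) (hj : j + 1 ≤ l.length) :
    ((l.drop (j + 1)).countP p : Int) =
      ∑ k ∈ Finset.Ico (j + 1) l.length, (if p (l.getD k 0) then (1 : Int) else 0) := by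
  have hsplit : l.countP p = (l.take (j + 1)).countP p + (l.drop (j + 1)).countP p := by
    conv_lhs => rw [← List.take_append_drop (j + 1) l]
    exact List.countP_append ..
  have h1 := pv_countP_take l p (j + 1) hj
  have h2 := pv_countP_take l p l.length le_rfl
  rw [List.take_length] at h2
  rw [Finset.sum_Ico_eq_sub _ hj, ← h1, ← h2]
  omega

-- A's value as a double sum over (middle j, top k)
lemma pv_solution_sum (l : List Int) (h3 : 3 ≤ l.length) :
    solution l = ∑ j ∈ Finset.Ico 1 (l.length - 1), ∑ k ∈ Finset.Ico (j + 1) l.length, pvL l j * pvInd l j k := by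
  unfold solution
  rw [if_neg (by omega)]
  rw [show ((l.length : Int) - 1) = ((l.length - 1 : Nat) : Int) by omega]
  rw [PySem.List.pyRange_one, List.foldl_map, PySem.List.foldl_add, zero_add, pv_sum_map_range]
  rw [Finset.sum_Ico_eq_sum_range,
    show (((l.length - 1 : Nat) : Int) - 1).toNat = l.length - 1 - 1 by omega]
  apply Finset.sum_congr rfl
  intro k hk
  rw [Finset.mem_range] at hk
  have hc1 : (1 : Int) + (k : Int) = ((1 + k : Nat) : Int) := by push_cast; ring
  have hc2 : ((1 + k : Nat) : Int) + 1 = (((1 + k) + 1 : Nat) : Int) := by push_cast; ring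
  rw [hc1, hc2, PySem.List.pyGetD_natCast, PySem.List.slice_to_natCast,
    PySem.List.slice_from_natCast]
  rw [← List.countP_eq_length_filter, ← List.countP_eq_length_filter]
  have hL : (((l.take (1 + k)).countP (fun x => PySem.Int.mod (l.getD (1 + k) 0) x == 0) : Nat) : Int)
      = pvL l (1 + k) := by
    rw [pv_countP_take l _ (1 + k) (by omega)]
    unfold pvL pvInd
    rfl
  have hR : (((l.drop ((1 + k) + 1)).countP (fun z => PySem.Int.mod z (l.getD (1 + k) 0) == 0) : Nat) : Int)
      = ∑ m ∈ Finset.Ico ((1 + k) + 1) l.length, pvInd l (1 + k) m := by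
    rw [pv_countP_drop l _ (1 + k) (by omega)]
    unfold pvInd
    rfl
  rw [hL, hR, Finset.mul_sum]

-- B's value as the transposed double sum over (top k, middle j)
lemma pv_solution_alt_sum (l : List Int) (h3 : 3 ≤ l.length) :
    solution_alt l = ∑ k ∈ Finset.range l.length, ∑ j ∈ Finset.range k, pvL l j * pvInd l j k := by
  unfold solution_alt
  rw [if_neg (by omega)]
  have hpairs : ((PySem.List.pyRange 0 (l.length : Int) 1).foldl (fun pairs j =>
      pairs ++ [(PySem.List.pyRange 0 j 1).foldl (fun c i =>
        if PySem.Int.mod (PySem.List.pyGetD l j 0) (PySem.List.pyGetD l i 0) == 0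
        then c + 1 else c) (0 : Int)]) ([] : List Int))
      = (List.range l.length).map (fun j => pvL l j) := by
    rw [PySem.List.foldl_append_singleton_eq_map, List.nil_append,
      PySem.List.pyRange_zero_natCast, List.map_map]
    apply List.map_congr_left
    intro j hj
    simp only [Function.comp]
    rw [PySem.List.pyRange_zero_natCast, List.foldl_map, PySem.List.foldl_count_if, zero_add,
      pv_count_range]
    simp only [PySem.List.pyGetD_natCast]
    unfold pvL pvInd
    rfl
  rw [hpairs, PySem.List.pyRange_zero_natCast, List.foldl_map]
  have houter : ∀ (total : Int) (k : Nat), k ≤ l.length →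
      (PySem.List.pyRange 0 (k : Int) 1).foldl (fun total j =>
        if PySem.Int.mod (PySem.List.pyGetD l (k : Int) 0) (PySem.List.pyGetD l j 0) == 0
        then total + PySem.List.pyGetD ((List.range l.length).map (fun j => pvL l j)) j 0
        else total) total
      = total + ∑ j ∈ Finset.range k, pvL l j * pvInd l j k := by
    intro total k hk
    rw [PySem.List.pyRange_zero_natCast, List.foldl_map]
    have hbody : ∀ (acc : Int), ∀ j ∈ List.range k,
        (if PySem.Int.mod (PySem.List.pyGetD l (k : Int) 0) (PySem.List.pyGetD l (j : Int) 0) == 0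
         then acc + PySem.List.pyGetD ((List.range l.length).map (fun j => pvL l j)) (j : Int) 0
         else acc)
        = acc + pvL l j * pvInd l j k := by
      intro acc j hj
      rw [List.mem_range] at hj
      simp only [PySem.List.pyGetD_natCast]
      rw [PySem.List.getD_map_range _ _ _ _ (by omega)]
      unfold pvInd
      split <;> simp
    rw [PySem.List.foldl_congr_mem _ _ _ _ hbody, PySem.List.foldl_add, pv_sum_map_range]
  have hout2 : ∀ (acc : Int), ∀ k ∈ List.range l.length,
      (PySem.List.pyRange 0 (k : Int) 1).foldl (fun total j =>
        if PySem.Int.mod (PySem.List.pyGetD l (k : Int) 0) (PySem.List.pyGetD l j 0) == 0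
        then total + PySem.List.pyGetD ((List.range l.length).map (fun j => pvL l j)) j 0
        else total) acc
      = acc + ∑ j ∈ Finset.range k, pvL l j * pvInd l j k := by
    intro acc k hk
    rw [List.mem_range] at hk
    exact houter acc k (by omega)
  rw [PySem.List.foldl_congr_mem _ _ _ _ hout2, PySem.List.foldl_add, zero_add, pv_sum_map_range]

-- dropping the two vanishing boundary terms of the outer sum
lemma pv_sum_trim (n : Nat) (h3 : 3 ≤ n) (T : Nat → Int) (h0 : T 0 = 0) (htop : T (n - 1) = 0) :
    ∑ j ∈ Finset.range n, T j = ∑ j ∈ Finset.Ico 1 (n - 1), T j := by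
  rw [Finset.range_eq_Ico, Finset.sum_eq_sum_Ico_succ_bot (by omega : 0 < n), h0, zero_add]
  have hstep : ∑ j ∈ Finset.Ico 1 ((n - 1) + 1), T j = ∑ j ∈ Finset.Ico 1 (n - 1), T j + T (n - 1) :=
    Finset.sum_Ico_succ_top (by omega) _
  have hn : (n - 1) + 1 = n := by omega
  rw [hn] at hstep
  rw [hstep, htop, add_zero]

-- exchanging the two summations
lemma pv_sum_swap (n : Nat) (f : Nat → Nat → Int) :
    ∑ k ∈ Finset.range n, ∑ j ∈ Finset.range k, f j k
      = ∑ j ∈ Finset.range n, ∑ k ∈ Finset.Ico (j + 1) n, f j k := by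
  induction n with
  | zero => simp
  | succ n ih =>
    rw [Finset.sum_range_succ, ih, Finset.sum_range_succ]
    have h1 : ∀ j ∈ Finset.range n,
        ∑ k ∈ Finset.Ico (j + 1) (n + 1), f j k
          = (∑ k ∈ Finset.Ico (j + 1) n, f j k) + f j n := by
      intro j hj
      rw [Finset.mem_range] at hj
      exact Finset.sum_Ico_succ_top (by omega) _
    rw [Finset.sum_congr rfl h1, Finset.sum_add_distrib]
    simp

-- ===== VERDICT (by name: the statement is the Claim_ definition above) =====
theorem solution_spec : Claim_equal_solution := by
  intro l _ _
  unfold Spec_solution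
  by_cases h3 : 3 ≤ l.length
  · rw [pv_solution_sum l h3, pv_solution_alt_sum l h3, pv_sum_swap]
    rw [pv_sum_trim l.length h3 _ (by simp [pvL])
      (by rw [Finset.Ico_eq_empty (by omega : ¬ (l.length - 1 + 1 < l.length))]; simp)]
  · have hlt : l.length < 3 := by omega
    unfold solution solution_alt
    rw [if_pos (by omega), if_pos (by omega)]
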